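-- pv_equiv track=rewrite | github.com/lloydhasley/BendixG15 | python/g15d/G15Subr.py | instr_2_hex_string
-- ===== SOURCE A (Python) =====
-- hex_to_ascii = '0123456789uvwxyz'
--
-- def instr_2_hex_string(instr):
--     '''
--     convert the binary encoded instruction value
--     :param encoded:
--     :return:
--
--     converted the binary encoded instruction value
--     to G15 SIGNED hex
--
--     '''
--     # extract sign bit (LSB)
--     if instr & 1:
--         out_str = '-'
--     else:
--         out_str = ' '
--
--     instr >>= 1
--     for i in range(7):
--         j = 6 - i
--         nibble = (instr >> (4 * j)) & 0xf
--         out_str += hex_to_ascii[nibble]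
--     return out_str
-- ===== SOURCE B (Python) =====
-- _TABLE = str.maketrans('abcdef', 'uvwxyz')
--
--
-- def instr_2_hex_string(instr):
--     sign = '-' if instr & 1 else ' '
--     value = (instr >> 1) & 0xFFFFFFF
--     return sign + format(value, '07x').translate(_TABLE)
-- ===== Notes on version B (the rewrite author's own statement) =====
-- stated objective: idiomatic
-- what changed: Replaces the explicit seven-iteration nibble-extraction loop (shift each position, mask, index a custom alphabet) with one mask to the magnitude bits, a single hex-format call of the masked twenty-eight-bit value and a str.translate table mapping a-f to u-z.
import Mathlib
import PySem

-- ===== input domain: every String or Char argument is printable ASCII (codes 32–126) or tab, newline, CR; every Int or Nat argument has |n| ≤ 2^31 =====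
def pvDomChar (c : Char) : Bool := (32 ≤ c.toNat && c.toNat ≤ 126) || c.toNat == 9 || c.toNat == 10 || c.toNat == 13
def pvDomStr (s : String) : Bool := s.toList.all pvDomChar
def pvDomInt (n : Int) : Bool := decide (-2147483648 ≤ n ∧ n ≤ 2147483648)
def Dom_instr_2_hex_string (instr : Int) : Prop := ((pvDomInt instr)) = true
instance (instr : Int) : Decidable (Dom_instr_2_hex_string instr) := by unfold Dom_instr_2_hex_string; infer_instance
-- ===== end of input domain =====

-- B replaces A's explicit per-nibble extraction loop by one mask, a fixed-width hex
-- formatting pass and a character translation table (objective: idiomatic).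


-- ===== PORT A =====
-- hex_to_ascii = '0123456789uvwxyz'
def hex_to_ascii : List Char := ['0','1','2','3','4','5','6','7','8','9','u','v','w','x','y','z']

def instr_2_hex_string (instr : Int) : String :=
  -- if instr & 1: out_str = '-' else out_str = ' '
  let out_str : List Char := if PySem.Int.band instr 1 ≠ 0 then ['-'] else [' ']
  -- instr >>= 1
  let instr1 := instr >>> 1
  -- for i in range(7): j = 6 - i; nibble = (instr >> (4*j)) & 0xf; out_str += hex_to_ascii[nibble]
  let out := (PySem.List.pyRange 0 7 1).foldl
    (fun out_str i =>
      let j : Int := 6 - i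
      let nibble := PySem.Int.band (instr1 >>> (4 * j).toNat) 15
      out_str ++ [PySem.List.pyGetD hex_to_ascii nibble ' ']) out_str
  String.mk out

-- ===== PORT B =====
def pvHexDigits : List Char := ['0','1','2','3','4','5','6','7','8','9','a','b','c','d','e','f']

-- str.translate with str.maketrans('abcdef', 'uvwxyz'): exact (identity on every other char)
def pvTranslate (c : Char) : Char :=
  match c with
  | 'a' => 'u' | 'b' => 'v' | 'c' => 'w' | 'd' => 'x' | 'e' => 'y' | 'f' => 'z'
  | c => c

-- format(value, '07x') for 0 ≤ value < 16^7, ported by hand: seven hex digits built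
-- back-to-front by repeated divmod 16 (exact on that range, which the mask guarantees)
def pvFormat07x : Nat → Nat → List Char → List Char
  | 0, _, acc => acc
  | n + 1, v, acc => pvFormat07x n (v / 16) (pvHexDigits.getD (v % 16) '0' :: acc)

def instr_2_hex_string_alt (instr : Int) : String :=
  let sign := if PySem.Int.band instr 1 ≠ 0 then '-' else ' '
  let value := PySem.Int.band (instr >>> 1) 0xFFFFFFF
  String.mk (sign :: (pvFormat07x 7 value.toNat []).map pvTranslate)

-- ===== PRECONDITION & SPEC =====
def Spec_instr_2_hex_string (instr : Int) (out : String) : Prop := out = instr_2_hex_string_alt instr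
instance (instr : Int) (out : String) : Decidable (Spec_instr_2_hex_string instr out) := by unfold Spec_instr_2_hex_string; infer_instance

-- ===== CLAIM (what is proved, stated in full; the proofs are below) =====
def Claim_equal_instr_2_hex_string : Prop := ∀ (instr : Int), Dom_instr_2_hex_string instr → Spec_instr_2_hex_string instr (instr_2_hex_string instr)

-- ===== LEMMAS AND PROOFS =====

-- Python's a & 15 is a % 16, also on negatives (two's complement)
lemma pv_band_mod16 (a : Int) : PySem.Int.band a 15 = a % 16 := by
  unfold PySem.Int.band
  norm_num
  simp only [show Int.toNat 15 = 15 from rfl]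
  split_ifs with ha
  · have h1 := Nat.and_two_pow_sub_one_eq_mod a.toNat 4
    norm_num at h1
    omega
  · have h2 := Nat.and_two_pow_sub_one_eq_mod ((-a).toNat - 1) 4
    rw [Nat.and_comm] at h2
    norm_num at h2
    omega

-- Python's a & 0xFFFFFFF is a % 2^28, also on negatives
lemma pv_band_mod28 (a : Int) : PySem.Int.band a 268435455 = a % 268435456 := by
  unfold PySem.Int.band
  norm_num
  simp only [show Int.toNat 268435455 = 268435455 from rfl]
  split_ifs with ha
  · have h1 := Nat.and_two_pow_sub_one_eq_mod a.toNat 28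
    norm_num at h1
    omega
  · have h2 := Nat.and_two_pow_sub_one_eq_mod ((-a).toNat - 1) 28
    rw [Nat.and_comm] at h2
    norm_num at h2
    omega

-- at equal digit values the two alphabets (A's direct one, B's translated one) agree
lemma pv_digit_eq (dI : Int) (dN : Nat) (h1 : dI = dN) (h2 : dN < 16) :
    PySem.List.pyGetD hex_to_ascii dI ' ' = pvTranslate (pvHexDigits.getD dN '0') := by
  subst h1; interval_cases dN <;> decide

lemma pv_main (instr : Int) : instr_2_hex_string instr = instr_2_hex_string_alt instr := by
  unfold instr_2_hex_string instr_2_hex_string_alt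
  have hr : PySem.List.pyRange 0 7 1 = [0, 1, 2, 3, 4, 5, 6] := by decide
  simp only [hr, List.foldl, pvFormat07x, List.map]
  norm_num [Int.shiftRight_eq_div_pow, pv_band_mod16, pv_band_mod28]
  simp only [show Int.toNat 24 = 24 from rfl, show Int.toNat 20 = 20 from rfl,
    show Int.toNat 16 = 16 from rfl, show Int.toNat 12 = 12 from rfl,
    show Int.toNat 8 = 8 from rfl, show Int.toNat 4 = 4 from rfl]
  norm_num
  split_ifs <;>
  · refine congrArg String.mk ?_
    simp only [List.cons_append, List.nil_append, List.cons.injEq, and_true, true_and]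
    refine ⟨?_, ?_, ?_, ?_, ?_, ?_, ?_⟩ <;> exact pv_digit_eq _ _ (by omega) (by omega)

-- ===== VERDICT (by name: the statement is the Claim_ definition above) =====
theorem instr_2_hex_string_spec : Claim_equal_instr_2_hex_string := by
  intro instr _
  unfold Spec_instr_2_hex_string
  exact pv_main instr
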